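-- pv_equiv track=rewrite | github.com/hdlabco-dev/world-map | tools/build_world.py | _calculate_title
-- ===== SOURCE A (Python) =====
-- def _calculate_title(node_count: int) -> str:
--     """根據知識點數量給予稱號"""
--     titles = [
--         (0, "初心者"),
--         (5, "見習旅者"),
--         (15, "知識探索者"),
--         (30, "學問追求者"),
--         (50, "智慧收集家"),
--         (100, "知識守護者"),
--         (200, "博學大師"),
--         (500, "傳說賢者"),
--     ]
--     title = "初心者"
--     for threshold, t in titles:
--         if node_count >= threshold:
--             title = t
--     return title
-- ===== SOURCE B (Python) =====
-- def _calculate_title(node_count: int) -> str: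
--     """根據知識點數量給予稱號 — binary search over the sorted thresholds instead of a full linear scan."""
--     thresholds = [0, 5, 15, 30, 50, 100, 200, 500]
--     titles = ["初心者", "見習旅者", "知識探索者", "學問追求者",
--               "智慧收集家", "知識守護者", "博學大師", "傳說賢者"]
--     # bisect_right by hand (A imports nothing, so no bisect module)
--     lo, hi = 0, len(thresholds)
--     while lo < hi:
--         mid = (lo + hi) // 2
--         if thresholds[mid] <= node_count:
--             lo = mid + 1
--         else:
--             hi = mid
--     if lo == 0:
--         return "初心者"
--     return titles[lo - 1]
-- ===== Notes on version B (the rewrite author's own statement) =====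
-- stated objective: alternative
-- what changed: Replaced the full linear scan that repeatedly overwrites `title` with a hand-written bisect_right binary search over the sorted thresholds list, returning titles[idx-1] (or the default for idx 0).
import Mathlib
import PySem

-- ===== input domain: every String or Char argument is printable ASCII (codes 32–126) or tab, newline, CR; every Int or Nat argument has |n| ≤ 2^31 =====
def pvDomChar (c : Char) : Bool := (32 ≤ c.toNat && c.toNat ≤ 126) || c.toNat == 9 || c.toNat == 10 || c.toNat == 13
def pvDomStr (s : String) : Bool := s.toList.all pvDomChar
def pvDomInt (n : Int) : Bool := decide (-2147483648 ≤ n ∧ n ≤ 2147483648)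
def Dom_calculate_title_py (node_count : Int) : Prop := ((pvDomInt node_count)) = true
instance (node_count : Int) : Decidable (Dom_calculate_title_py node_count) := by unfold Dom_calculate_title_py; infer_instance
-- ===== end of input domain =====

-- B replaces A's full linear scan (last matching threshold wins) by a hand-written
-- bisect_right binary search over the sorted thresholds; same result, different algorithm.
-- ===== PORT A =====
def calculate_title_py (node_count : Int) : String :=
  let titles : List (Int × String) := [((0 : Int), "初心者"), ((5 : Int), "見習旅者"), ((15 : Int), "知識探索者"), ((30 : Int), "學問追求者"), ((50 : Int), "智慧收集家"), ((100 : Int), "知識守護者"), ((200 : Int), "博學大師"), ((500 : Int), "傳說賢者")]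
  titles.foldl (fun title p => if node_count ≥ p.1 then p.2 else title) "初心者"

-- ===== PORT B =====
-- hand-ported while-loop binary search (bisect_right); Python's thresholds[mid] is always
-- in range here (0 ≤ mid < 8), so the .getD 0 default is unreachable — exact on all inputs.
def pvBsearch (thresholds : List Int) (node_count : Int) (lo hi : Nat) : Nat :=
  if _h : lo < hi then
    let mid := (lo + hi) / 2
    if (PySem.List.pyGet? thresholds (mid : Int)).getD 0 ≤ node_count then
      pvBsearch thresholds node_count (mid + 1) hi
    else
      pvBsearch thresholds node_count lo mid
  else lo
termination_by hi - lo
decreasing_by all_goals omega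

def calculate_title_py_alt (node_count : Int) : String :=
  let thresholds : List Int := [0, 5, 15, 30, 50, 100, 200, 500]
  let titles : List String := ["初心者", "見習旅者", "知識探索者", "學問追求者", "智慧收集家", "知識守護者", "博學大師", "傳說賢者"]
  let lo := pvBsearch thresholds node_count 0 thresholds.length
  if lo = 0 then "初心者"
  else (PySem.List.pyGet? titles ((lo : Int) - 1)).getD "初心者"  -- index always in range; default unreachable

-- ===== PRECONDITION & SPEC =====
def Spec_calculate_title_py (node_count : Int) (out : String) : Prop := out = calculate_title_py_alt node_count
instance (node_count : Int) (out : String) : Decidable (Spec_calculate_title_py node_count out) := by unfold Spec_calculate_title_py; infer_instance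

-- ===== CLAIM (what is proved, stated in full; the proofs are below) =====
def Claim_equal_calculate_title_py : Prop := ∀ (node_count : Int), Dom_calculate_title_py node_count → Spec_calculate_title_py node_count (calculate_title_py node_count)

-- ===== LEMMAS AND PROOFS =====

-- ===== VERDICT (by name: the statement is the Claim_ definition above) =====
theorem calculate_title_py_spec : Claim_equal_calculate_title_py := by
  intro n _
  unfold Spec_calculate_title_py
  by_cases c0 : ((0:Int) ≤ n)
  · by_cases c1 : ((5:Int) ≤ n)
    · by_cases c2 : ((15:Int) ≤ n)
      · by_cases c3 : ((30:Int) ≤ n)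
        · by_cases c4 : ((50:Int) ≤ n)
          · by_cases c5 : ((100:Int) ≤ n)
            · by_cases c6 : ((200:Int) ≤ n)
              · by_cases c7 : ((500:Int) ≤ n)
                · simp only [calculate_title_py, calculate_title_py_alt]
                  norm_num [PySem.List.pyGet?, PySem.List.pyIdx?, show Int.toNat 0 = 0 from rfl, show Int.toNat 1 = 1 from rfl, show Int.toNat 2 = 2 from rfl, show Int.toNat 3 = 3 from rfl, show Int.toNat 4 = 4 from rfl, show Int.toNat 5 = 5 from rfl, show Int.toNat 6 = 6 from rfl, show Int.toNat 7 = 7 from rfl, show ((0:Int) ≤ n) from by omega, show ((5:Int) ≤ n) from by omega, show ((15:Int) ≤ n) from by omega, show ((30:Int) ≤ n) from by omega, show ((50:Int) ≤ n) from by omega, show ((100:Int) ≤ n) from by omega, show ((200:Int) ≤ n) from by omega, show ((500:Int) ≤ n) from by omega]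
                  repeat (rw [pvBsearch]; norm_num [PySem.List.pyGet?, PySem.List.pyIdx?, show Int.toNat 0 = 0 from rfl, show Int.toNat 1 = 1 from rfl, show Int.toNat 2 = 2 from rfl, show Int.toNat 3 = 3 from rfl, show Int.toNat 4 = 4 from rfl, show Int.toNat 5 = 5 from rfl, show Int.toNat 6 = 6 from rfl, show Int.toNat 7 = 7 from rfl, show ((0:Int) ≤ n) from by omega, show ((5:Int) ≤ n) from by omega, show ((15:Int) ≤ n) from by omega, show ((30:Int) ≤ n) from by omega, show ((50:Int) ≤ n) from by omega, show ((100:Int) ≤ n) from by omega, show ((200:Int) ≤ n) from by omega, show ((500:Int) ≤ n) from by omega])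
                · simp only [calculate_title_py, calculate_title_py_alt]
                  norm_num [PySem.List.pyGet?, PySem.List.pyIdx?, show Int.toNat 0 = 0 from rfl, show Int.toNat 1 = 1 from rfl, show Int.toNat 2 = 2 from rfl, show Int.toNat 3 = 3 from rfl, show Int.toNat 4 = 4 from rfl, show Int.toNat 5 = 5 from rfl, show Int.toNat 6 = 6 from rfl, show Int.toNat 7 = 7 from rfl, show ((0:Int) ≤ n) from by omega, show ((5:Int) ≤ n) from by omega, show ((15:Int) ≤ n) from by omega, show ((30:Int) ≤ n) from by omega, show ((50:Int) ≤ n) from by omega, show ((100:Int) ≤ n) from by omega, show ((200:Int) ≤ n) from by omega, show ¬((500:Int) ≤ n) from by omega]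
                  repeat (rw [pvBsearch]; norm_num [PySem.List.pyGet?, PySem.List.pyIdx?, show Int.toNat 0 = 0 from rfl, show Int.toNat 1 = 1 from rfl, show Int.toNat 2 = 2 from rfl, show Int.toNat 3 = 3 from rfl, show Int.toNat 4 = 4 from rfl, show Int.toNat 5 = 5 from rfl, show Int.toNat 6 = 6 from rfl, show Int.toNat 7 = 7 from rfl, show ((0:Int) ≤ n) from by omega, show ((5:Int) ≤ n) from by omega, show ((15:Int) ≤ n) from by omega, show ((30:Int) ≤ n) from by omega, show ((50:Int) ≤ n) from by omega, show ((100:Int) ≤ n) from by omega, show ((200:Int) ≤ n) from by omega, show ¬((500:Int) ≤ n) from by omega])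
              · simp only [calculate_title_py, calculate_title_py_alt]
                norm_num [PySem.List.pyGet?, PySem.List.pyIdx?, show Int.toNat 0 = 0 from rfl, show Int.toNat 1 = 1 from rfl, show Int.toNat 2 = 2 from rfl, show Int.toNat 3 = 3 from rfl, show Int.toNat 4 = 4 from rfl, show Int.toNat 5 = 5 from rfl, show Int.toNat 6 = 6 from rfl, show Int.toNat 7 = 7 from rfl, show ((0:Int) ≤ n) from by omega, show ((5:Int) ≤ n) from by omega, show ((15:Int) ≤ n) from by omega, show ((30:Int) ≤ n) from by omega, show ((50:Int) ≤ n) from by omega, show ((100:Int) ≤ n) from by omega, show ¬((200:Int) ≤ n) from by omega, show ¬((500:Int) ≤ n) from by omega]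
                repeat (rw [pvBsearch]; norm_num [PySem.List.pyGet?, PySem.List.pyIdx?, show Int.toNat 0 = 0 from rfl, show Int.toNat 1 = 1 from rfl, show Int.toNat 2 = 2 from rfl, show Int.toNat 3 = 3 from rfl, show Int.toNat 4 = 4 from rfl, show Int.toNat 5 = 5 from rfl, show Int.toNat 6 = 6 from rfl, show Int.toNat 7 = 7 from rfl, show ((0:Int) ≤ n) from by omega, show ((5:Int) ≤ n) from by omega, show ((15:Int) ≤ n) from by omega, show ((30:Int) ≤ n) from by omega, show ((50:Int) ≤ n) from by omega, show ((100:Int) ≤ n) from by omega, show ¬((200:Int) ≤ n) from by omega, show ¬((500:Int) ≤ n) from by omega])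
            · simp only [calculate_title_py, calculate_title_py_alt]
              norm_num [PySem.List.pyGet?, PySem.List.pyIdx?, show Int.toNat 0 = 0 from rfl, show Int.toNat 1 = 1 from rfl, show Int.toNat 2 = 2 from rfl, show Int.toNat 3 = 3 from rfl, show Int.toNat 4 = 4 from rfl, show Int.toNat 5 = 5 from rfl, show Int.toNat 6 = 6 from rfl, show Int.toNat 7 = 7 from rfl, show ((0:Int) ≤ n) from by omega, show ((5:Int) ≤ n) from by omega, show ((15:Int) ≤ n) from by omega, show ((30:Int) ≤ n) from by omega, show ((50:Int) ≤ n) from by omega, show ¬((100:Int) ≤ n) from by omega, show ¬((200:Int) ≤ n) from by omega, show ¬((500:Int) ≤ n) from by omega]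
              repeat (rw [pvBsearch]; norm_num [PySem.List.pyGet?, PySem.List.pyIdx?, show Int.toNat 0 = 0 from rfl, show Int.toNat 1 = 1 from rfl, show Int.toNat 2 = 2 from rfl, show Int.toNat 3 = 3 from rfl, show Int.toNat 4 = 4 from rfl, show Int.toNat 5 = 5 from rfl, show Int.toNat 6 = 6 from rfl, show Int.toNat 7 = 7 from rfl, show ((0:Int) ≤ n) from by omega, show ((5:Int) ≤ n) from by omega, show ((15:Int) ≤ n) from by omega, show ((30:Int) ≤ n) from by omega, show ((50:Int) ≤ n) from by omega, show ¬((100:Int) ≤ n) from by omega, show ¬((200:Int) ≤ n) from by omega, show ¬((500:Int) ≤ n) from by omega])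
          · simp only [calculate_title_py, calculate_title_py_alt]
            norm_num [PySem.List.pyGet?, PySem.List.pyIdx?, show Int.toNat 0 = 0 from rfl, show Int.toNat 1 = 1 from rfl, show Int.toNat 2 = 2 from rfl, show Int.toNat 3 = 3 from rfl, show Int.toNat 4 = 4 from rfl, show Int.toNat 5 = 5 from rfl, show Int.toNat 6 = 6 from rfl, show Int.toNat 7 = 7 from rfl, show ((0:Int) ≤ n) from by omega, show ((5:Int) ≤ n) from by omega, show ((15:Int) ≤ n) from by omega, show ((30:Int) ≤ n) from by omega, show ¬((50:Int) ≤ n) from by omega, show ¬((100:Int) ≤ n) from by omega, show ¬((200:Int) ≤ n) from by omega, show ¬((500:Int) ≤ n) from by omega]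
            repeat (rw [pvBsearch]; norm_num [PySem.List.pyGet?, PySem.List.pyIdx?, show Int.toNat 0 = 0 from rfl, show Int.toNat 1 = 1 from rfl, show Int.toNat 2 = 2 from rfl, show Int.toNat 3 = 3 from rfl, show Int.toNat 4 = 4 from rfl, show Int.toNat 5 = 5 from rfl, show Int.toNat 6 = 6 from rfl, show Int.toNat 7 = 7 from rfl, show ((0:Int) ≤ n) from by omega, show ((5:Int) ≤ n) from by omega, show ((15:Int) ≤ n) from by omega, show ((30:Int) ≤ n) from by omega, show ¬((50:Int) ≤ n) from by omega, show ¬((100:Int) ≤ n) from by omega, show ¬((200:Int) ≤ n) from by omega, show ¬((500:Int) ≤ n) from by omega])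
        · simp only [calculate_title_py, calculate_title_py_alt]
          norm_num [PySem.List.pyGet?, PySem.List.pyIdx?, show Int.toNat 0 = 0 from rfl, show Int.toNat 1 = 1 from rfl, show Int.toNat 2 = 2 from rfl, show Int.toNat 3 = 3 from rfl, show Int.toNat 4 = 4 from rfl, show Int.toNat 5 = 5 from rfl, show Int.toNat 6 = 6 from rfl, show Int.toNat 7 = 7 from rfl, show ((0:Int) ≤ n) from by omega, show ((5:Int) ≤ n) from by omega, show ((15:Int) ≤ n) from by omega, show ¬((30:Int) ≤ n) from by omega, show ¬((50:Int) ≤ n) from by omega, show ¬((100:Int) ≤ n) from by omega, show ¬((200:Int) ≤ n) from by omega, show ¬((500:Int) ≤ n) from by omega]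
          repeat (rw [pvBsearch]; norm_num [PySem.List.pyGet?, PySem.List.pyIdx?, show Int.toNat 0 = 0 from rfl, show Int.toNat 1 = 1 from rfl, show Int.toNat 2 = 2 from rfl, show Int.toNat 3 = 3 from rfl, show Int.toNat 4 = 4 from rfl, show Int.toNat 5 = 5 from rfl, show Int.toNat 6 = 6 from rfl, show Int.toNat 7 = 7 from rfl, show ((0:Int) ≤ n) from by omega, show ((5:Int) ≤ n) from by omega, show ((15:Int) ≤ n) from by omega, show ¬((30:Int) ≤ n) from by omega, show ¬((50:Int) ≤ n) from by omega, show ¬((100:Int) ≤ n) from by omega, show ¬((200:Int) ≤ n) from by omega, show ¬((500:Int) ≤ n) from by omega])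
      · simp only [calculate_title_py, calculate_title_py_alt]
        norm_num [PySem.List.pyGet?, PySem.List.pyIdx?, show Int.toNat 0 = 0 from rfl, show Int.toNat 1 = 1 from rfl, show Int.toNat 2 = 2 from rfl, show Int.toNat 3 = 3 from rfl, show Int.toNat 4 = 4 from rfl, show Int.toNat 5 = 5 from rfl, show Int.toNat 6 = 6 from rfl, show Int.toNat 7 = 7 from rfl, show ((0:Int) ≤ n) from by omega, show ((5:Int) ≤ n) from by omega, show ¬((15:Int) ≤ n) from by omega, show ¬((30:Int) ≤ n) from by omega, show ¬((50:Int) ≤ n) from by omega, show ¬((100:Int) ≤ n) from by omega, show ¬((200:Int) ≤ n) from by omega, show ¬((500:Int) ≤ n) from by omega]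
        repeat (rw [pvBsearch]; norm_num [PySem.List.pyGet?, PySem.List.pyIdx?, show Int.toNat 0 = 0 from rfl, show Int.toNat 1 = 1 from rfl, show Int.toNat 2 = 2 from rfl, show Int.toNat 3 = 3 from rfl, show Int.toNat 4 = 4 from rfl, show Int.toNat 5 = 5 from rfl, show Int.toNat 6 = 6 from rfl, show Int.toNat 7 = 7 from rfl, show ((0:Int) ≤ n) from by omega, show ((5:Int) ≤ n) from by omega, show ¬((15:Int) ≤ n) from by omega, show ¬((30:Int) ≤ n) from by omega, show ¬((50:Int) ≤ n) from by omega, show ¬((100:Int) ≤ n) from by omega, show ¬((200:Int) ≤ n) from by omega, show ¬((500:Int) ≤ n) from by omega])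
    · simp only [calculate_title_py, calculate_title_py_alt]
      norm_num [PySem.List.pyGet?, PySem.List.pyIdx?, show Int.toNat 0 = 0 from rfl, show Int.toNat 1 = 1 from rfl, show Int.toNat 2 = 2 from rfl, show Int.toNat 3 = 3 from rfl, show Int.toNat 4 = 4 from rfl, show Int.toNat 5 = 5 from rfl, show Int.toNat 6 = 6 from rfl, show Int.toNat 7 = 7 from rfl, show ((0:Int) ≤ n) from by omega, show ¬((5:Int) ≤ n) from by omega, show ¬((15:Int) ≤ n) from by omega, show ¬((30:Int) ≤ n) from by omega, show ¬((50:Int) ≤ n) from by omega, show ¬((100:Int) ≤ n) from by omega, show ¬((200:Int) ≤ n) from by omega, show ¬((500:Int) ≤ n) from by omega]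
      repeat (rw [pvBsearch]; norm_num [PySem.List.pyGet?, PySem.List.pyIdx?, show Int.toNat 0 = 0 from rfl, show Int.toNat 1 = 1 from rfl, show Int.toNat 2 = 2 from rfl, show Int.toNat 3 = 3 from rfl, show Int.toNat 4 = 4 from rfl, show Int.toNat 5 = 5 from rfl, show Int.toNat 6 = 6 from rfl, show Int.toNat 7 = 7 from rfl, show ((0:Int) ≤ n) from by omega, show ¬((5:Int) ≤ n) from by omega, show ¬((15:Int) ≤ n) from by omega, show ¬((30:Int) ≤ n) from by omega, show ¬((50:Int) ≤ n) from by omega, show ¬((100:Int) ≤ n) from by omega, show ¬((200:Int) ≤ n) from by omega, show ¬((500:Int) ≤ n) from by omega])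
  · simp only [calculate_title_py, calculate_title_py_alt]
    norm_num [PySem.List.pyGet?, PySem.List.pyIdx?, show Int.toNat 0 = 0 from rfl, show Int.toNat 1 = 1 from rfl, show Int.toNat 2 = 2 from rfl, show Int.toNat 3 = 3 from rfl, show Int.toNat 4 = 4 from rfl, show Int.toNat 5 = 5 from rfl, show Int.toNat 6 = 6 from rfl, show Int.toNat 7 = 7 from rfl, show ¬((0:Int) ≤ n) from by omega, show ¬((5:Int) ≤ n) from by omega, show ¬((15:Int) ≤ n) from by omega, show ¬((30:Int) ≤ n) from by omega, show ¬((50:Int) ≤ n) from by omega, show ¬((100:Int) ≤ n) from by omega, show ¬((200:Int) ≤ n) from by omega, show ¬((500:Int) ≤ n) from by omega]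
    repeat (rw [pvBsearch]; norm_num [PySem.List.pyGet?, PySem.List.pyIdx?, show Int.toNat 0 = 0 from rfl, show Int.toNat 1 = 1 from rfl, show Int.toNat 2 = 2 from rfl, show Int.toNat 3 = 3 from rfl, show Int.toNat 4 = 4 from rfl, show Int.toNat 5 = 5 from rfl, show Int.toNat 6 = 6 from rfl, show Int.toNat 7 = 7 from rfl, show ¬((0:Int) ≤ n) from by omega, show ¬((5:Int) ≤ n) from by omega, show ¬((15:Int) ≤ n) from by omega, show ¬((30:Int) ≤ n) from by omega, show ¬((50:Int) ≤ n) from by omega, show ¬((100:Int) ≤ n) from by omega, show ¬((200:Int) ≤ n) from by omega, show ¬((500:Int) ≤ n) from by omega])
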